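-- pv_equiv track=rewrite | github.com/ghleokim/codeTestProblems | kakao/kakao2017_17678_bus.py | solution
-- ===== SOURCE A (Python) =====
-- def solution(n, t, m, timetable): # 17678
--     answer = ''
--
--     # timetext: 시간 배열을 분으로 표시
--     timetext = []
--     for tt in timetable:
--         timetext.append(int(tt[:2])*60+int(tt[-2:]))
--
--     timetext.sort()
--
--     passengerid = [None for _ in range(n)]
--     bustime = 540
--     person = 0
--     for bus in range(n):
--         bustime = 540 + bus * t
--         jungwon = m
--         for i in range(m):
--             if person == len(timetable):
--                 break
--             elif timetext[person] <= bustime and jungwon > 0: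
--                 if passengerid[bus]:
--                     passengerid[bus].append(person)
--                 else:
--                     passengerid[bus] = [person]
--                 person += 1
--                 jungwon -= 1
--             else:
--                 break
--
--     # 마지막 버스에 승객 탑승이고 만석일 때: 마지막 승객 - 1분
--     if passengerid[-1] and len(passengerid[-1]) == m:
--         offset = timetext[passengerid[-1][-1]]-541
--         answer = f'{9+offset//60:0>2}:{offset%60:0>2}'
--     else:
--         offset = (n-1)*t
--         answer = f'{9+offset//60:0>2}:{offset%60:0>2}'
--
--
--     return answer
-- ===== SOURCE B (Python) =====
-- def solution(n, t, m, timetable):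
--     # Single pass over passengers (instead of nested bus x seat loops):
--     # each sorted arrival is placed on the current bus, advancing the bus
--     # pointer when the bus is full or departs before the passenger arrives.
--     times = sorted(int(s[:2]) * 60 + int(s[-2:]) for s in timetable)
--     b = 0      # current bus index
--     seats = 0  # passengers already on bus b
--     cnt = 0    # passengers on the last bus
--     last = 0   # arrival time of the last passenger on the last bus
--     for x in times:
--         if seats == m:
--             b += 1
--             seats = 0
--         while b < n and x > 540 + b * t:
--             b += 1
--             seats = 0
--         if b >= n:
--             break
--         seats += 1
--         if b == n - 1:
--             cnt += 1
--             last = x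
--     v = last - 1 if cnt == m else 540 + (n - 1) * t
--     return '%02d:%02d' % (v // 60, v % 60)
-- ===== Notes on version B (the rewrite author's own statement) =====
-- stated objective: faster
-- what changed: A simulates bus-by-bus with a nested seat loop and a per-bus passenger-id table and then inspects the last bus; B makes a single pass over the sorted arrival times, advancing a bus pointer when the current bus fills or departs, tracking only the count and last arrival on the final bus.
-- outside the precondition, e.g. on solution(1, 1, 0, ['10:00']): A returns '09:00', B returns '-1:59'
import Mathlib
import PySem

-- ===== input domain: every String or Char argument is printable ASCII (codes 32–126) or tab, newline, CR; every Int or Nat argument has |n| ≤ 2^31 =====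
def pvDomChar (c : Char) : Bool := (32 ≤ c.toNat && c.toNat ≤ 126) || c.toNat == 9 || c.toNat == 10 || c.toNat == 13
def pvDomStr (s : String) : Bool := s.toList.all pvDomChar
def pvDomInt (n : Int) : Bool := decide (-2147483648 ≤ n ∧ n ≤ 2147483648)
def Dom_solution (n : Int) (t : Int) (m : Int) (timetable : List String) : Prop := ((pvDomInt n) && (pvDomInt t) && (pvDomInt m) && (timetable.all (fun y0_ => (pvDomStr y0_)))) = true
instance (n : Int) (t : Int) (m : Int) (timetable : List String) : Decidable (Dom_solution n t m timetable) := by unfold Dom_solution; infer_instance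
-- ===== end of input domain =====

-- B replaces A's nested bus×seat boarding loops by a single pass over the sorted passengers
-- that advances a bus pointer (alternative decomposition; also removes the O(n·m) bus scan).

-- int(tt[:2])*60 + int(tt[-2:]) — shared by both Pythons verbatim (total form; Pre_ guarantees both parses succeed)
def parseMin (s : String) : Int :=
  (PySem.Int.ofStr? (PySem.Str.slice s none (some 2))).getD 0 * 60
  + (PySem.Int.ofStr? (PySem.Str.slice s (some (-2)) none)).getD 0

-- format(v, '0>2') on str(v) — at width 2 this coincides with '%02d' (both prepend one '0' iff str(v) has length 1)
def pad2 (v : Int) : List Char :=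
  let cs := PySem.Int.toChars v
  if cs.length < 2 then '0' :: cs else cs

-- f'{hh:0>2}:{mm:0>2}'  /  '%02d:%02d' % (hh, mm)
def fmtClock (hh mm : Int) : String := String.ofList (pad2 hh ++ ':' :: pad2 mm)

-- ===== PORT A =====
-- inner 'for i in range(m)' loop: state (passengerid, person, jungwon); early return = break
def innerA (timetext : List Int) (M bustime bus : Int) :
    List Int → List (Option (List Int)) → Int → Int → (List (Option (List Int)) × Int × Int)
  | [], pid, person, jungwon => (pid, person, jungwon)
  | _ :: is, pid, person, jungwon =>
    if person = M then (pid, person, jungwon)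
    else if PySem.List.pyGetD timetext person 0 ≤ bustime ∧ jungwon > 0 then
      -- 'if passengerid[bus]: append else [person]' (None and [] are falsy)
      let pid' := PySem.List.pySetD pid bus
        (match PySem.List.pyGetD pid bus none with
         | some (h :: l) => some (h :: l ++ [person])
         | _ => some [person])
      innerA timetext M bustime bus is pid' (person + 1) (jungwon - 1)
    else (pid, person, jungwon)

-- outer 'for bus in range(n)' loop
def outerA (timetext : List Int) (M t m : Int) :
    List Int → List (Option (List Int)) → Int → (List (Option (List Int)) × Int)
  | [], pid, person => (pid, person)
  | bus :: bs, pid, person =>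
    let bustime := 540 + bus * t
    let r := innerA timetext M bustime bus (PySem.List.pyRange 0 m 1) pid person m
    outerA timetext M t m bs r.1 r.2.1

def solution (n : Int) (t : Int) (m : Int) (timetable : List String) : String :=
  let timetext := PySem.List.sorted (timetable.map parseMin) (fun x => x) false
  let pid0 : List (Option (List Int)) := (PySem.List.pyRange 0 n 1).map (fun _ => none)
  let r := outerA timetext (timetable.length : Int) t m (PySem.List.pyRange 0 n 1) pid0 0
  match PySem.List.pyGet? r.1 (-1) with
  | some (some (h :: l)) =>
    if ((h :: l).length : Int) = m then
      let offset := PySem.List.pyGetD timetext (PySem.List.pyGetD (h :: l) (-1) 0) 0 - 541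
      fmtClock (9 + PySem.Int.floordiv offset 60) (PySem.Int.mod offset 60)
    else
      let offset := (n - 1) * t
      fmtClock (9 + PySem.Int.floordiv offset 60) (PySem.Int.mod offset 60)
  | some _ =>
    let offset := (n - 1) * t
    fmtClock (9 + PySem.Int.floordiv offset 60) (PySem.Int.mod offset 60)
  | none => ""  -- passengerid[-1] raises IndexError in Python (n ≤ 0); excluded by Pre_

-- ===== PORT B =====
-- 'while b < n and x > 540 + b * t: b += 1'
def skipB (n t x : Int) (b : Int) : Int :=
  if b < n ∧ x > 540 + b * t then skipB n t x (b + 1) else b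
termination_by (n - b).toNat
decreasing_by omega

-- 'for x in times' loop: state (b, seats, cnt, last); early return = break
def loopB (n t m : Int) : List Int → Int → Int → Int → Int → Int × Int
  | [], _, _, cnt, last => (cnt, last)
  | x :: xs, b, seats, cnt, last =>
    let bs := if seats = m then (b + 1, 0) else (b, seats)
    let b' := skipB n t x bs.1
    let seats' := if b' = bs.1 then bs.2 else 0  -- the while body zeroes seats whenever it moves
    if b' ≥ n then (cnt, last)
    else loopB n t m xs b' (seats' + 1)
      (if b' = n - 1 then cnt + 1 else cnt) (if b' = n - 1 then x else last)

def solution_alt (n : Int) (t : Int) (m : Int) (timetable : List String) : String :=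
  let times := PySem.List.sorted (timetable.map parseMin) (fun x => x) false
  let r := loopB n t m times 0 0 0 0
  let v := if r.1 = m then r.2 - 1 else 540 + (n - 1) * t
  fmtClock (PySem.Int.floordiv v 60) (PySem.Int.mod v 60)

-- ===== PRECONDITION & SPEC =====
-- Pre_ requires: n ≥ 1 (A raises IndexError on passengerid[-1] otherwise), both int(...) parses of every
-- timetable entry to succeed (A raises ValueError otherwise), and m ≠ 0: a capacity of exactly 0 is outside
-- the problem's domain (it guarantees m ≥ 1) and is the one corner where B's empty-last-bus count (0)
-- spuriously equals the capacity, so the two programs return different values there.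
def Pre_solution (n : Int) (t : Int) (m : Int) (timetable : List String) : Prop :=
  1 ≤ n ∧ m ≠ 0 ∧ ∀ s ∈ timetable,
    (PySem.Int.ofStr? (PySem.Str.slice s none (some 2))).isSome ∧
    (PySem.Int.ofStr? (PySem.Str.slice s (some (-2)) none)).isSome
instance (n : Int) (t : Int) (m : Int) (timetable : List String) : Decidable (Pre_solution n t m timetable) := by unfold Pre_solution; infer_instance

def pvWitness_solution : Int × Int × Int × List String := (2, 10, 2, ["08:00", "09:10", "08:05"])

def Spec_solution (n : Int) (t : Int) (m : Int) (timetable : List String) (out : String) : Prop := out = solution_alt n t m timetable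
instance (n : Int) (t : Int) (m : Int) (timetable : List String) (out : String) : Decidable (Spec_solution n t m timetable out) := by unfold Spec_solution; infer_instance

-- ===== CLAIM (what is proved, stated in full; the proofs are below) =====
def Claim_equal_solution : Prop := ∀ (n : Int) (t : Int) (m : Int) (timetable : List String), Dom_solution n t m timetable → Pre_solution n t m timetable → Spec_solution n t m timetable (solution n t m timetable)

-- ===== LEMMAS AND PROOFS =====

-- number of leading elements ≤ btime (what one bus can see of the waiting queue)
def cw (btime : Int) (l : List Int) : Nat := (l.takeWhile (fun x => decide (x ≤ btime))).length

-- the person indices pn, pn+1, …, pn+k-1 (contents of one passengerid entry)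
def persons : Nat → Nat → List Int
  | _, 0 => []
  | pn, k + 1 => (pn : Int) :: persons (pn + 1) k

-- person pointer after processing a list of buses (common spec of both loops)
def pAcc (ts : List Int) (t : Int) (mN : Nat) : List Int → Nat → Nat
  | [], pn => pn
  | b :: bs, pn => pAcc ts t mN bs (pn + min mN (cw (540 + b * t) (ts.drop pn)))

lemma cw_cons_le {x b : Int} (l : List Int) (h : x ≤ b) : cw b (x :: l) = cw b l + 1 := by
  simp [cw, h]
lemma cw_cons_gt {x b : Int} (l : List Int) (h : ¬ x ≤ b) : cw b (x :: l) = 0 := by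
  simp [cw, h]
lemma cw_le_length (b : Int) (l : List Int) : cw b l ≤ l.length := by
  induction l with
  | nil => simp [cw]
  | cons x xs ih =>
    by_cases h : x ≤ b
    · rw [cw_cons_le xs h]; simpa using ih
    · rw [cw_cons_gt xs h]; omega

lemma persons_length (pn k : Nat) : (persons pn k).length = k := by
  induction k generalizing pn with
  | zero => rfl
  | succ k ih => simp [persons, ih]

lemma persons_ne_nil (pn k : Nat) (hk : k ≠ 0) : persons pn k ≠ [] := by
  cases k with
  | zero => omega
  | succ k => simp [persons]

lemma persons_getLast (pn k : Nat) (hk : k ≠ 0) (h : persons pn k ≠ []) :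
    (persons pn k).getLast h = ((pn + k - 1 : Nat) : Int) := by
  induction k generalizing pn with
  | zero => omega
  | succ k ih =>
    cases k with
    | zero => simp [persons]
    | succ k' =>
      have h2 : persons (pn+1) (k'+1) ≠ [] := persons_ne_nil _ _ (by omega)
      have : (persons pn (k'+1+1)).getLast h = (persons (pn+1) (k'+1)).getLast h2 := by
        exact (List.getLast_cons h2).symm ▸ rfl
      rw [this, ih _ (by omega)]
      congr 1
      omega

-- format shift: f'{9+x//60:0>2}:{x%60:0>2}'  =  '%02d:%02d' % ((540+x)//60, (540+x)%60)
lemma fmt_shift (x : Int) :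
    fmtClock (9 + PySem.Int.floordiv x 60) (PySem.Int.mod x 60)
      = fmtClock (PySem.Int.floordiv (540 + x) 60) (PySem.Int.mod (540 + x) 60) := by
  have h1 := PySem.Int.floordiv_mul_add_mod x 60
  have h2 := PySem.Int.floordiv_mul_add_mod (540 + x) 60
  have h3 := PySem.Int.mod_nonneg x (by norm_num : (0:Int) < 60)
  have h4 := PySem.Int.mod_lt x (by norm_num : (0:Int) < 60)
  have h5 := PySem.Int.mod_nonneg (540 + x) (by norm_num : (0:Int) < 60)
  have h6 := PySem.Int.mod_lt (540 + x) (by norm_num : (0:Int) < 60)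
  have hq : PySem.Int.floordiv (540 + x) 60 = 9 + PySem.Int.floordiv x 60 := by omega
  have hr : PySem.Int.mod (540 + x) 60 = PySem.Int.mod x 60 := by omega
  rw [hq, hr]

lemma skipB_of_not {n t x b : Int} (h : ¬ (b < n ∧ x > 540 + b * t)) : skipB n t x b = b := by
  rw [skipB, if_neg h]

lemma skipB_step {n t x b : Int} (h : b < n ∧ x > 540 + b * t) :
    skipB n t x b = skipB n t x (b + 1) := by
  rw [skipB, if_pos h]

lemma le_skipB (n t x : Int) : ∀ b, b ≤ skipB n t x b := by
  intro b
  fun_induction skipB n t x b with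
  | case1 b h ih => omega
  | case2 b h => omega

lemma loopB_done (n t m : Int) :
    ∀ (l : List Int) (b s cnt last : Int), n ≤ b →
      loopB n t m l b s cnt last = (cnt, last) := by
  intro l b s cnt last hb
  cases l with
  | nil => rfl
  | cons x xs =>
    simp only [loopB]
    have h1 : b ≤ (if s = m then (b + 1, (0:Int)) else (b, s)).1 := by
      split <;> simp
    have h2 : n ≤ skipB n t x (if s = m then (b + 1, (0:Int)) else (b, s)).1 :=
      le_trans (le_trans hb h1) (le_skipB _ _ _ _)
    rw [if_pos h2]

lemma loopB_full (n t m : Int) (hm : 1 ≤ m) :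
    ∀ (l : List Int) (b cnt last : Int),
      loopB n t m l b m cnt last = loopB n t m l (b + 1) 0 cnt last := by
  intro l b cnt last
  cases l with
  | nil => rfl
  | cons x xs =>
    simp only [loopB]
    simp [show ¬ (0:Int) = m from by omega]

lemma loopB_char (n t m : Int) (hm : 1 ≤ m) (b : Int) (hb : b < n) :
    ∀ (l : List Int) (sn : Nat) (hs : (sn : Int) < m) (cnt last : Int),
      loopB n t m l b (sn : Int) cnt last
        = loopB n t m (l.drop (min (m.toNat - sn) (cw (540 + b * t) l))) (b + 1) 0
            (if b = n - 1 then cnt + ((min (m.toNat - sn) (cw (540 + b * t) l) : Nat) : Int) else cnt)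
            (if b = n - 1 ∧ min (m.toNat - sn) (cw (540 + b * t) l) ≠ 0
             then l.getD (min (m.toNat - sn) (cw (540 + b * t) l) - 1) 0 else last) := by
  intro l
  induction l with
  | nil =>
    intro sn hs cnt last
    have h0 : cw (540 + b * t) ([] : List Int) = 0 := rfl
    simp [h0, loopB]
  | cons x xs ih =>
    intro sn hs cnt last
    have hsm : ¬ ((sn : Int) = m) := by omega
    by_cases hx : x ≤ 540 + b * t
    · -- passenger boards bus b
      have hcw : cw (540 + b * t) (x :: xs) = cw (540 + b * t) xs + 1 := cw_cons_le xs hx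
      have hskip : skipB n t x b = b := skipB_of_not (by omega)
      rw [loopB, if_neg hsm]
      simp only [hskip, if_neg (show ¬ b ≥ n from by omega), if_true]
      have hcast : ((sn : Int) + 1) = ((sn + 1 : Nat) : Int) := by push_cast; ring
      by_cases hfull : ((sn : Int) + 1) < m
      · -- still room: recurse on the same bus
        rw [hcast, ih (sn + 1) (by rw [← hcast]; exact hfull)]
        have hk : min (m.toNat - sn) (cw (540 + b * t) (x :: xs))
            = min (m.toNat - (sn + 1)) (cw (540 + b * t) xs) + 1 := by
          rw [hcw]; omega
        rw [hk]
        congr 1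
        · push_cast
          split <;> ring
        · by_cases hlast : b = n - 1
          · subst hlast
            by_cases hk0 : min (m.toNat - (sn + 1)) (cw (540 + (n - 1) * t) xs) = 0
            · rcases Nat.min_eq_zero_iff.mp hk0 with h | h <;> simp [h]
            · obtain ⟨j, hj⟩ : ∃ j, min (m.toNat - (sn + 1)) (cw (540 + (n - 1) * t) xs) = j + 1 :=
                ⟨min (m.toNat - (sn + 1)) (cw (540 + (n - 1) * t) xs) - 1, by omega⟩
              have h1 := Nat.min_le_left (m.toNat - (sn + 1)) (cw (540 + (n - 1) * t) xs)
              have h2 := Nat.min_le_right (m.toNat - (sn + 1)) (cw (540 + (n - 1) * t) xs)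
              rw [if_pos ⟨by omega, by omega⟩, hj]
              simp
          · simp [hlast]
      · -- bus b is now full
        have hsn1 : ((sn + 1 : Nat) : Int) = m := by omega
        rw [hcast, hsn1, loopB_full n t m hm]
        have hk : min (m.toNat - sn) (cw (540 + b * t) (x :: xs)) = 1 := by
          rw [hcw]; omega
        rw [hk]
        simp
    · -- passenger arrives after bus b leaves: identical to starting at bus b+1
      have hcw : cw (540 + b * t) (x :: xs) = 0 := cw_cons_gt xs hx
      have hskip : skipB n t x b = skipB n t x (b + 1) := skipB_step (by omega)
      rw [hcw]
      simp only [Nat.min_zero, List.drop_zero, Nat.cast_zero]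
      rw [loopB, if_neg hsm, loopB, if_neg (show ¬ (0:Int) = m by omega)]
      simp only [hskip]
      have hgt : b + 1 ≤ skipB n t x (b + 1) := le_skipB _ _ _ _
      have hne : ¬ skipB n t x (b + 1) = b := by omega
      simp [hne]

lemma pAcc_le (ts : List Int) (t : Int) (mN : Nat) :
    ∀ (bl : List Int) (pn : Nat), pn ≤ ts.length → pAcc ts t mN bl pn ≤ ts.length := by
  intro bl
  induction bl with
  | nil => intro pn h; exact h
  | cons b bs ih =>
    intro pn h
    apply ih
    have h1 := cw_le_length (540 + b * t) (ts.drop pn)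
    simp only [List.length_drop] at h1
    have h2 := Nat.min_le_right mN (cw (540 + b * t) (ts.drop pn))
    omega

lemma loopB_phase (ts : List Int) (n t m : Int) (hm : 1 ≤ m) :
    ∀ (c : Nat) (b0 : Int), b0 = n - 1 - (c : Int) → 0 ≤ b0 →
      ∀ (pn : Nat) (cnt last : Int),
        loopB n t m (ts.drop pn) b0 0 cnt last
          = loopB n t m (ts.drop (pAcc ts t m.toNat (PySem.List.pyRange b0 (n - 1) 1) pn)) (n - 1) 0 cnt last := by
  intro c
  induction c with
  | zero =>
    intro b0 hb0 _ pn cnt last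
    have hb : b0 = n - 1 := by omega
    subst hb
    rw [PySem.List.pyRange_one_eq_nil (le_refl _)]
    rfl
  | succ c ih =>
    intro b0 hb0 hge pn cnt last
    have hlt : b0 < n - 1 := by omega
    rw [PySem.List.pyRange_one_cons hlt]
    have h0m : ((0 : Nat) : Int) < m := by omega
    have hchar := loopB_char n t m hm b0 (by omega) (ts.drop pn) 0 h0m cnt last
    simp only [Nat.cast_zero, Nat.sub_zero] at hchar
    rw [hchar, if_neg (by omega : ¬ b0 = n - 1),
        if_neg (by simp; omega : ¬ (b0 = n - 1 ∧ min m.toNat (cw (540 + b0 * t) (ts.drop pn)) ≠ 0))]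
    rw [List.drop_drop]
    have := ih (b0 + 1) (by omega) (by omega) (pn + min m.toNat (cw (540 + b0 * t) (ts.drop pn))) cnt last
    rw [this]
    rfl

def valB (ts : List Int) (n t m : Int) : Int :=
  if ((min m.toNat (cw (540 + (n - 1) * t) (ts.drop (pAcc ts t m.toNat (PySem.List.pyRange 0 (n - 1) 1) 0))) : Nat) : Int) = m
  then (ts.drop (pAcc ts t m.toNat (PySem.List.pyRange 0 (n - 1) 1) 0)).getD
         (min m.toNat (cw (540 + (n - 1) * t) (ts.drop (pAcc ts t m.toNat (PySem.List.pyRange 0 (n - 1) 1) 0))) - 1) 0 - 1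
  else 540 + (n - 1) * t

lemma alt_eval (n t m : Int) (timetable : List String) (hn : 1 ≤ n) (hm : 1 ≤ m) :
    solution_alt n t m timetable
      = fmtClock (PySem.Int.floordiv (valB (PySem.List.sorted (timetable.map parseMin) (fun x => x) false) n t m) 60)
                 (PySem.Int.mod (valB (PySem.List.sorted (timetable.map parseMin) (fun x => x) false) n t m) 60) := by
  simp only [solution_alt]
  set ts := PySem.List.sorted (timetable.map parseMin) (fun x => x) false with hts
  set pn := pAcc ts t m.toNat (PySem.List.pyRange 0 (n - 1) 1) 0 with hpn
  set k := min m.toNat (cw (540 + (n - 1) * t) (ts.drop pn)) with hk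
  have h1 : loopB n t m ts 0 0 0 0 = loopB n t m (ts.drop pn) (n - 1) 0 0 0 := by
    have := loopB_phase ts n t m hm (n - 1).toNat 0 (by omega) (by omega) 0 0 0
    simpa using this
  have h0m : ((0 : Nat) : Int) < m := by omega
  have h2 := loopB_char n t m hm (n - 1) (by omega) (ts.drop pn) 0 h0m 0 0
  simp only [Nat.cast_zero, Nat.sub_zero] at h2
  rw [h1, h2]
  rw [loopB_done n t m _ _ _ _ _ (by omega : n ≤ n - 1 + 1)]
  simp only [if_true, true_and, zero_add, ← hk]
  simp only [valB, ← hpn, ← hk]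
  by_cases hkm : ((k : Nat) : Int) = m
  · have hk0 : k ≠ 0 := by omega
    rw [if_pos hkm, if_pos hkm, if_pos hk0]
  · rw [if_neg hkm, if_neg hkm]

-- ---- A side ----

lemma innerA_char (ts : List Int) (M btime : Int) (hM : M = (ts.length : Int)) (busn : Nat) :
    ∀ (sl : List Int) (pid : List (Option (List Int))) (pn : Nat) (acc : List Int),
      busn < pid.length → pn ≤ ts.length →
      PySem.List.pyGetD pid (busn : Int) none = (if acc.isEmpty then none else some acc) →
      innerA ts M btime (busn : Int) sl pid (pn : Int) ((sl.length : Nat) : Int)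
        = (if min sl.length (cw btime (ts.drop pn)) = 0 then pid
            else PySem.List.pySetD pid (busn : Int)
              (some (acc ++ persons pn (min sl.length (cw btime (ts.drop pn))))),
           ((pn + min sl.length (cw btime (ts.drop pn)) : Nat) : Int),
           ((sl.length - min sl.length (cw btime (ts.drop pn)) : Nat) : Int)) := by
  intro sl
  induction sl with
  | nil =>
    intro pid pn acc hbus hpn hentry
    simp [innerA]
  | cons s is ih =>
    intro pid pn acc hbus hpn hentry
    by_cases hpnM : pn = ts.length
    · have hdrop : ts.drop pn = [] := by
        apply List.drop_eq_nil_of_le; omega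
      rw [innerA, if_pos (by rw [hM, hpnM])]
      simp [hdrop, cw]
    · have hpn' : pn < ts.length := by omega
      have hne : ¬ ((pn : Int) = M) := by rw [hM]; intro h; exact hpnM (by exact_mod_cast h)
      have hdrop : ts.drop pn = ts[pn] :: ts.drop (pn + 1) := List.drop_eq_getElem_cons hpn'
      have hget : PySem.List.pyGetD ts (pn : Int) 0 = ts[pn] := by
        rw [PySem.List.pyGetD_natCast, List.getD_eq_getElem?_getD, List.getElem?_eq_getElem hpn']
        rfl
      rw [innerA, if_neg hne]
      by_cases hle : ts[pn] ≤ btime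
      · have hpos : ((is.length + 1 : Nat) : Int) > 0 := by positivity
        rw [if_pos ⟨by rw [hget]; exact hle, hpos⟩]
        have hcw : cw btime (ts.drop pn) = cw btime (ts.drop (pn + 1)) + 1 := by
          rw [hdrop, cw_cons_le _ hle]
        -- the updated entry is acc ++ [pn]
        have hupd : (match PySem.List.pyGetD pid (busn : Int) none with
              | some (h :: l) => some (h :: l ++ [(pn : Int)])
              | _ => some [(pn : Int)]) = some (acc ++ [(pn : Int)]) := by
          rw [hentry]
          cases acc with
          | nil => rfl
          | cons a as => simp
        rw [hupd]
        have harg1 : (pn : Int) + 1 = ((pn + 1 : Nat) : Int) := by push_cast; ring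
        have harg2 : (((s :: is).length : Nat) : Int) - 1 = ((is.length : Nat) : Int) := by
          push_cast [List.length_cons]; ring
        rw [harg1, harg2]
        rw [ih (PySem.List.pySetD pid (busn : Int) (some (acc ++ [(pn : Int)]))) (pn + 1) (acc ++ [(pn : Int)])
              (by rw [PySem.List.length_pySetD]; exact hbus) (by omega)
              (by rw [PySem.List.pyGetD_pySetD_natCast _ _ _ _ _ hbus, if_pos rfl]; simp)]
        have hk : min (s :: is).length (cw btime (ts.drop pn))
            = min is.length (cw btime (ts.drop (pn + 1))) + 1 := by
          rw [hcw, List.length_cons]; omega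
        rw [hk]
        simp only [Prod.mk.injEq]
        refine ⟨?_, ?_, ?_⟩
        · rw [if_neg (Nat.succ_ne_zero _)]
          by_cases hk0 : min is.length (cw btime (ts.drop (pn + 1))) = 0
          · rw [if_pos hk0, hk0]
            simp [persons]
          · rw [if_neg hk0]
            rw [PySem.List.pySetD_natCast, PySem.List.pySetD_natCast, PySem.List.pySetD_natCast, List.set_set]
            rw [show persons pn (min is.length (cw btime (ts.drop (pn + 1))) + 1)
                  = (pn : Int) :: persons (pn + 1) (min is.length (cw btime (ts.drop (pn + 1)))) from rfl]
            simp
        · congr 1; omega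
        · congr 1; omega
      · rw [if_neg (by rw [hget]; intro h; exact hle h.1)]
        have hcw : cw btime (ts.drop pn) = 0 := by rw [hdrop]; exact cw_cons_gt _ hle
        simp [hcw]

lemma outerA_append (ts : List Int) (M t m : Int) :
    ∀ (l1 l2 : List Int) (pid : List (Option (List Int))) (p : Int),
      outerA ts M t m (l1 ++ l2) pid p
        = outerA ts M t m l2 (outerA ts M t m l1 pid p).1 (outerA ts M t m l1 pid p).2 := by
  intro l1
  induction l1 with
  | nil => intro l2 pid p; rfl
  | cons b bs ih => intro l2 pid p; rw [List.cons_append, outerA, outerA, ih]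

lemma outerA_phase (ts : List Int) (t m : Int) (hm : 1 ≤ m) (e : Nat) :
    ∀ (bl : List Int) (pid : List (Option (List Int))) (pn : Nat),
      bl.Nodup →
      (∀ b ∈ bl, ∃ bn : Nat, b = (bn : Int) ∧ bn < pid.length ∧ bn ≠ e
          ∧ PySem.List.pyGetD pid b none = none) →
      pn ≤ ts.length →
      ∃ pid', outerA ts (ts.length : Int) t m bl pid (pn : Int)
            = (pid', ((pAcc ts t m.toNat bl pn : Nat) : Int))
          ∧ pid'.length = pid.length
          ∧ PySem.List.pyGetD pid' (e : Int) none = PySem.List.pyGetD pid (e : Int) none := by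
  intro bl
  induction bl with
  | nil =>
    intro pid pn _ _ _
    exact ⟨pid, rfl, rfl, rfl⟩
  | cons b bs ih =>
    intro pid pn hnd hmem hpn
    obtain ⟨bn, hb, hbn, hbne, hnone⟩ := hmem b (List.mem_cons_self ..)
    subst hb
    rw [outerA]
    have hsl : ((PySem.List.pyRange 0 m 1).length : Int) = m := by
      rw [PySem.List.length_pyRange_one]; omega
    have hchar := innerA_char ts (ts.length : Int) (540 + (bn : Int) * t) rfl bn
      (PySem.List.pyRange 0 m 1) pid pn [] hbn hpn (by simpa using hnone)
    rw [hsl] at hchar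
    rw [hchar]
    have hlen : (PySem.List.pyRange 0 m 1).length = m.toNat := by
      rw [PySem.List.length_pyRange_one]; omega
    set k := min m.toNat (cw (540 + (bn : Int) * t) (ts.drop pn)) with hkdef
    have hk' : min (PySem.List.pyRange 0 m 1).length (cw (540 + (bn : Int) * t) (ts.drop pn)) = k := by
      rw [hlen]
    simp only [hk', List.nil_append]
    have hcwle := cw_le_length (540 + (bn : Int) * t) (ts.drop pn)
    simp only [List.length_drop] at hcwle
    have hpn' : pn + k ≤ ts.length := by
      have := Nat.min_le_right m.toNat (cw (540 + (bn : Int) * t) (ts.drop pn))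
      omega
    -- the pid after this bus
    set pid1 := (if k = 0 then pid else PySem.List.pySetD pid (bn : Int) (some (persons pn k))) with hpid1
    have hlen1 : pid1.length = pid.length := by
      rw [hpid1]; split
      · rfl
      · rw [PySem.List.length_pySetD]
    have hother : ∀ (j : Nat), j ≠ bn → PySem.List.pyGetD pid1 (j : Int) none
        = PySem.List.pyGetD pid (j : Int) none := by
      intro j hj
      rw [hpid1]; split
      · rfl
      · rw [PySem.List.pyGetD_pySetD_natCast _ _ _ _ _ hbn, if_neg hj]
    have hmem' : ∀ b' ∈ bs, ∃ bn' : Nat, b' = (bn' : Int) ∧ bn' < pid1.length ∧ bn' ≠ e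
        ∧ PySem.List.pyGetD pid1 b' none = none := by
      intro b' hb'
      obtain ⟨bn', hb1, hb2, hb3, hb4⟩ := hmem b' (List.mem_cons_of_mem _ hb')
      refine ⟨bn', hb1, by omega, hb3, ?_⟩
      have hne : bn' ≠ bn := by
        intro h
        subst h
        rw [hb1] at hb'
        exact (List.nodup_cons.mp hnd).1 hb'
      rw [hb1, hother bn' hne, ← hb1, hb4]
    obtain ⟨pid', h1, h2, h3⟩ := ih pid1 (pn + k) (List.nodup_cons.mp hnd).2 hmem' hpn'
    refine ⟨pid', ?_, by omega, ?_⟩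
    · rw [h1]
      rfl
    · rw [h3, hother e (fun h => hbne h.symm)]

lemma map_const_none_entry (l : List Int) (i : Int) :
    PySem.List.pyGetD (l.map (fun _ => (none : Option (List Int)))) i none = none := by
  cases h : PySem.List.pyGet? (l.map (fun _ => (none : Option (List Int)))) i with
  | none => exact PySem.List.pyGetD_of_none _ _ _ h
  | some x =>
    have hx := PySem.List.mem_of_pyGet?_eq_some _ h
    rw [List.mem_map] at hx
    obtain ⟨_, _, hx⟩ := hx
    rw [PySem.List.pyGetD, h, ← hx]
    rfl

lemma sol_eval (n t m : Int) (timetable : List String) (hn : 1 ≤ n) (hm : 1 ≤ m) :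
    solution n t m timetable
      = fmtClock (9 + PySem.Int.floordiv (valB (PySem.List.sorted (timetable.map parseMin) (fun x => x) false) n t m - 540) 60)
                 (PySem.Int.mod (valB (PySem.List.sorted (timetable.map parseMin) (fun x => x) false) n t m - 540) 60) := by
  simp only [solution]
  set ts := PySem.List.sorted (timetable.map parseMin) (fun x => x) false with hts
  have hlen : (timetable.length : Int) = (ts.length : Int) := by
    rw [hts, PySem.List.length_sorted, List.length_map]
  rw [hlen]
  set pid0 := (PySem.List.pyRange 0 n 1).map (fun _ => (none : Option (List Int))) with hpid0
  have hlen0 : pid0.length = n.toNat := by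
    rw [hpid0, List.length_map, PySem.List.length_pyRange_one]
    omega
  have hsing : PySem.List.pyRange (n - 1) n 1 = [n - 1] := by
    have := PySem.List.pyRange_one_singleton (n - 1)
    rw [show n - 1 + 1 = n from by ring] at this
    exact this
  have hsplit : PySem.List.pyRange 0 n 1 = PySem.List.pyRange 0 (n - 1) 1 ++ [n - 1] := by
    rw [PySem.List.pyRange_one_append 0 (n - 1) n (by omega) (by omega), hsing]
  rw [hsplit, outerA_append]
  set e := (n - 1).toNat with he
  have hecast : ((e : Nat) : Int) = n - 1 := by omega
  obtain ⟨pid', h1, hlen', hent'⟩ :=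
    outerA_phase ts t m hm e (PySem.List.pyRange 0 (n - 1) 1) pid0 0
      (PySem.List.nodup_pyRange_one 0 (n - 1))
      (by
        intro b hb
        have hmem := (PySem.List.mem_pyRange_one).mp hb
        refine ⟨b.toNat, by omega, by omega, by omega, ?_⟩
        rw [hpid0]
        exact map_const_none_entry _ _)
      (Nat.zero_le _)
  rw [show ((0 : Nat) : Int) = (0 : Int) from rfl] at h1
  rw [h1]
  set pn := pAcc ts t m.toNat (PySem.List.pyRange 0 (n - 1) 1) 0 with hpn
  have hpnle : pn ≤ ts.length := pAcc_le ts t m.toNat _ 0 (Nat.zero_le _)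
  -- last bus
  rw [outerA]
  have hsl : ((PySem.List.pyRange 0 m 1).length : Int) = m := by
    rw [PySem.List.length_pyRange_one]; omega
  have hchar := innerA_char ts (ts.length : Int) (540 + (n - 1) * t) rfl e
    (PySem.List.pyRange 0 m 1) pid' pn []
    (by omega) hpnle
    (by simpa using (hent'.trans (by rw [hpid0]; exact map_const_none_entry _ _)))
  rw [hsl, hecast] at hchar
  rw [hchar, outerA]
  simp only [List.nil_append]
  have hlenr : (PySem.List.pyRange 0 m 1).length = m.toNat := by
    rw [PySem.List.length_pyRange_one]; omega
  rw [hlenr]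
  set k := min m.toNat (cw (540 + (n - 1) * t) (ts.drop pn)) with hk
  set pidF := (if k = 0 then pid' else PySem.List.pySetD pid' (n - 1) (some (persons pn k))) with hpidF
  have hlenF : pidF.length = n.toNat := by
    rw [hpidF]; split
    · omega
    · rw [← hecast, PySem.List.length_pySetD]; omega
  have hvF : PySem.List.pyGetD pidF ((e : Nat) : Int) none = (if k = 0 then none else some (persons pn k)) := by
    rw [hpidF]; split
    · exact hent'.trans (by rw [hpid0]; exact map_const_none_entry _ _)
    · rw [← hecast, PySem.List.pyGetD_pySetD_natCast _ _ _ _ _ (by omega), if_pos rfl]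
  have hgetlast : PySem.List.pyGet? pidF (-1) = some (if k = 0 then none else some (persons pn k)) := by
    rw [PySem.List.pyGet?_neg_one, List.getLast?_eq_getElem?]
    have he' : e < pidF.length := by omega
    rw [show pidF.length - 1 = e from by omega]
    rw [List.getElem?_eq_getElem he']
    congr 1
    have := hvF
    rw [PySem.List.pyGetD_natCast, List.getD_eq_getElem?_getD, List.getElem?_eq_getElem he'] at this
    simpa using this
  rw [hgetlast]
  split
  next h l heq =>
    rw [Option.some.injEq] at heq
    by_cases hk0 : k = 0
    · rw [if_pos hk0] at heq
      exact absurd heq (by simp)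
    · rw [if_neg hk0, Option.some.injEq] at heq
      have hplen : (((h :: l).length : Nat) : Int) = ((k : Nat) : Int) := by
        rw [← heq, persons_length]
      rw [hplen]
      by_cases hkm : ((k : Nat) : Int) = m
      · rw [if_pos hkm]
        have hne : h :: l ≠ [] := by simp
        have hgl : PySem.List.pyGetD (h :: l) (-1) 0 = ((pn + k - 1 : Nat) : Int) := by
          rw [PySem.List.pyGetD_neg_one _ _ hne]
          have := persons_getLast pn k hk0 (by rw [heq]; exact hne)
          simp only [heq] at this
          exact this
        rw [hgl]
        have hts' : PySem.List.pyGetD ts ((pn + k - 1 : Nat) : Int) 0 = ts.getD (pn + k - 1) 0 := by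
          rw [PySem.List.pyGetD_natCast]
        rw [hts']
        have hvalB : valB ts n t m = ts.getD (pn + k - 1) 0 - 1 := by
          rw [valB, ← hpn, ← hk, if_pos hkm]
          congr 1
          rw [List.getD_eq_getElem?_getD, List.getD_eq_getElem?_getD, List.getElem?_drop]
          congr 2
          omega
        rw [hvalB]
        rw [show ts.getD (pn + k - 1) 0 - 1 - 540 = ts.getD (pn + k - 1) 0 - 541 from by ring]
      · rw [if_neg hkm]
        have hvalB : valB ts n t m = 540 + (n - 1) * t := by
          rw [valB, ← hpn, ← hk, if_neg hkm]
        rw [hvalB]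
        norm_num
  next val hne heq =>
    rw [Option.some.injEq] at heq
    have hk0 : k = 0 := by
      by_contra hk0
      obtain ⟨j, hj⟩ : ∃ j, k = j + 1 := ⟨k - 1, by omega⟩
      rw [if_neg hk0] at heq
      exact hne (pn : Int) (persons (pn + 1) j) (by rw [← heq, hj]; rfl)
    have hvalB : valB ts n t m = 540 + (n - 1) * t := by
      rw [valB, ← hpn, ← hk, if_neg (by omega)]
    rw [hvalB]
    norm_num
  next heq => exact absurd heq (by simp)

-- ---- the m < 0 case: nobody ever boards in A, and B's last-bus count (≥ 0) never equals m ----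

lemma outerA_nilrange (ts : List Int) (M t m : Int) (hm : m ≤ 0) :
    ∀ (bl : List Int) (pid : List (Option (List Int))) (p : Int),
      outerA ts M t m bl pid p = (pid, p) := by
  intro bl
  induction bl with
  | nil => intro pid p; rfl
  | cons b bs ih =>
    intro pid p
    rw [outerA, PySem.List.pyRange_one_eq_nil hm, innerA]
    exact ih pid p

lemma sol_eval_neg (n t m : Int) (timetable : List String) (hn : 1 ≤ n) (hm : m ≤ 0) :
    solution n t m timetable
      = fmtClock (9 + PySem.Int.floordiv ((n - 1) * t) 60) (PySem.Int.mod ((n - 1) * t) 60) := by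
  simp only [solution]
  rw [outerA_nilrange _ _ _ _ hm]
  set pid0 := (PySem.List.pyRange 0 n 1).map (fun _ => (none : Option (List Int))) with hpid0
  have hlen0 : pid0.length = n.toNat := by
    rw [hpid0, List.length_map, PySem.List.length_pyRange_one]
    omega
  have hlast : PySem.List.pyGet? pid0 (-1) = some none := by
    rw [PySem.List.pyGet?_neg_one]
    cases h : pid0.getLast? with
    | none =>
      rw [List.getLast?_eq_none_iff] at h
      rw [h] at hlen0
      simp at hlen0
      omega
    | some x =>
      have hx := List.mem_of_getLast? h
      rw [hpid0, List.mem_map] at hx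
      obtain ⟨_, _, hx⟩ := hx
      rw [← hx]
  rw [hlast]

lemma loopB_fst_nonneg (n t m : Int) :
    ∀ (l : List Int) (b s cnt last : Int), 0 ≤ cnt → 0 ≤ (loopB n t m l b s cnt last).1 := by
  intro l
  induction l with
  | nil => intro b s cnt last h; exact h
  | cons x xs ih =>
    intro b s cnt last h
    rw [loopB]
    split <;> split
    all_goals first
      | exact h
      | (apply ih; split <;> omega)

lemma alt_eval_neg (n t m : Int) (timetable : List String) (hm : m < 0) :
    solution_alt n t m timetable
      = fmtClock (PySem.Int.floordiv (540 + (n - 1) * t) 60) (PySem.Int.mod (540 + (n - 1) * t) 60) := by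
  simp only [solution_alt]
  have h := loopB_fst_nonneg n t m (PySem.List.sorted (timetable.map parseMin) (fun x => x) false)
    0 0 0 0 (le_refl 0)
  rw [if_neg (by omega)]

-- ===== VERDICT (by name: the statement is the Claim_ definition above) =====
theorem solution_spec : Claim_equal_solution := by
  unfold Claim_equal_solution
  intro n t m timetable _ hpre
  obtain ⟨hn, hm, -⟩ := hpre
  unfold Spec_solution
  rcases lt_or_gt_of_ne hm with hneg | hpos
  · rw [sol_eval_neg n t m timetable hn (by omega), alt_eval_neg n t m timetable hneg, fmt_shift]
  · rw [sol_eval n t m timetable hn (by omega), alt_eval n t m timetable hn (by omega), fmt_shift]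
    congr 2 <;> ring
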